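-- pv_equiv track=rewrite | github.com/NkululekoMbhele/absoluver | api/absoluver copy.py | check_if_simplified_digits
-- ===== SOURCE A (Python) =====
-- def check_if_simplified_digits(tokens):
--     simplified = False
--     signs = ["+", "-", "*", "/"]
--     details = ""
--     for index, token in enumerate(tokens):
--         if token in signs:
--             if tokens[index-1].isdigit() and tokens[index+1].isdigit():
--                 simplified = False
--             else:
--                 simplified = True
--     return simplified
-- ===== SOURCE B (Python) =====
-- def check_if_simplified_digits(tokens):
--     signs = ["+", "-", "*", "/"]
--     for i in range(len(tokens) - 1, -1, -1):
--         if tokens[i] in signs: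
--             return not (tokens[i - 1].isdigit() and tokens[i + 1].isdigit())
--     return False
-- ===== Notes on version B (the rewrite author's own statement) =====
-- stated objective: simpler
-- what changed: B scans backward and returns at the first (i.e. last) operator found, instead of A's forward loop that overwrites a flag at every operator; only the last operator determines the result.
import Mathlib
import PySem

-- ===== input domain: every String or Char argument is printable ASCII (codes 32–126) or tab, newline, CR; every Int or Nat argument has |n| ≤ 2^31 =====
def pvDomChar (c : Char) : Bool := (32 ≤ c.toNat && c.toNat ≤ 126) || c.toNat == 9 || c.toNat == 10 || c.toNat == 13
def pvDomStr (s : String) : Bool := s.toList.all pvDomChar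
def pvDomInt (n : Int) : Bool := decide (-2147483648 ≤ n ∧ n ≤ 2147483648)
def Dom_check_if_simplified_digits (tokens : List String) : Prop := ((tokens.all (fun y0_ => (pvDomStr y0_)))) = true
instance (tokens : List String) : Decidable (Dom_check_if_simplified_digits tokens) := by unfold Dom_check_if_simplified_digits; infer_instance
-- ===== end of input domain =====

-- B replaces A's forward flag-overwriting loop by a backward scan that returns at the last
-- operator (only the last operator determines A's result); objective: simpler.

-- ===== PORT A =====
-- forward loop over enumerate(tokens), overwriting `simplified` at every operator
def check_if_simplified_digits (tokens : List String) : Bool :=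
  (PySem.List.enumerate tokens 0).foldl
    (fun simplified p =>
      if p.2 ∈ ["+", "-", "*", "/"] then
        if PySem.Str.strIsdigit (PySem.List.pyGetD tokens (p.1 - 1) "") &&
           PySem.Str.strIsdigit (PySem.List.pyGetD tokens (p.1 + 1) "") then
          false
        else
          true
      else simplified)
    false

-- ===== PORT B =====
-- backward scan: `altFindB tokens n` is Source B's loop over i = n-1, n-2, …, 0, returning at the
-- first operator found
def altFindB (tokens : List String) : Nat → Bool
  | 0 => false
  | n + 1 =>
    if PySem.List.pyGetD tokens (n : Int) "" ∈ ["+", "-", "*", "/"] then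
      !(PySem.Str.strIsdigit (PySem.List.pyGetD tokens ((n : Int) - 1) "") &&
        PySem.Str.strIsdigit (PySem.List.pyGetD tokens ((n : Int) + 1) ""))
    else altFindB tokens n

def check_if_simplified_digits_alt (tokens : List String) : Bool :=
  altFindB tokens tokens.length

-- ===== PRECONDITION & SPEC =====
-- Pre_ excludes exactly the inputs on which Python A raises IndexError: the last token is an
-- operator and tokens[index-1] (wrapping to the last element when the list has one token) is a
-- digit string, so the short-circuit `and` reaches tokens[index+1] out of range; B's Python
-- raises identically there.
def Pre_check_if_simplified_digits (tokens : List String) : Prop :=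
  ¬ (tokens.getLastD "" ∈ ["+", "-", "*", "/"] ∧
     PySem.Str.strIsdigit (PySem.List.pyGetD tokens ((tokens.length : Int) - 2) "") = true)
instance (tokens : List String) : Decidable (Pre_check_if_simplified_digits tokens) := by
  unfold Pre_check_if_simplified_digits; infer_instance
def pvWitness_check_if_simplified_digits : List String := ["1", "+", "2"]

def Spec_check_if_simplified_digits (tokens : List String) (out : Bool) : Prop := out = check_if_simplified_digits_alt tokens
instance (tokens : List String) (out : Bool) : Decidable (Spec_check_if_simplified_digits tokens out) := by unfold Spec_check_if_simplified_digits; infer_instance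

-- ===== CLAIM (what is proved, stated in full; the proofs are below) =====
def Claim_equal_check_if_simplified_digits : Prop := ∀ (tokens : List String), Dom_check_if_simplified_digits tokens → Pre_check_if_simplified_digits tokens → Spec_check_if_simplified_digits tokens (check_if_simplified_digits tokens)

-- ===== LEMMAS AND PROOFS =====

-- A's fold over the first m enumerated tokens computes exactly B's backward scan over i < m.
theorem foldA_take_eq_altFindB (tokens : List String) :
    ∀ m, m ≤ tokens.length →
      (((PySem.List.enumerate tokens 0).take m).foldl
        (fun simplified p =>
          if p.2 ∈ ["+", "-", "*", "/"] then
            if PySem.Str.strIsdigit (PySem.List.pyGetD tokens (p.1 - 1) "") &&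
               PySem.Str.strIsdigit (PySem.List.pyGetD tokens (p.1 + 1) "") then
              false
            else
              true
          else simplified)
        false) = altFindB tokens m := by
  intro m
  induction m with
  | zero => intro _; simp [altFindB]
  | succ n ih =>
    intro h
    have hn : n < tokens.length := by omega
    have hlen : n < (PySem.List.enumerate tokens 0).length := by
      simpa [PySem.List.length_enumerate] using hn
    rw [List.take_add_one, List.getElem?_eq_getElem hlen, PySem.List.getElem_enumerate,
        List.foldl_append, ih (by omega)]
    have hget : PySem.List.pyGetD tokens (n : Int) "" = tokens[n] := by
      simp [PySem.List.pyGetD_natCast, List.getD_eq_getElem?_getD, List.getElem?_eq_getElem hn]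
    simp only [Option.toList_some, altFindB, List.foldl_cons, List.foldl_nil, hget, zero_add]
    by_cases hmem : tokens[n] ∈ ["+", "-", "*", "/"]
    · rw [if_pos hmem, if_pos hmem]
      cases h2 : PySem.Str.strIsdigit (PySem.List.pyGetD tokens ((n : Int) - 1) "") &&
          PySem.Str.strIsdigit (PySem.List.pyGetD tokens ((n : Int) + 1) "") <;> rfl
    · rw [if_neg hmem, if_neg hmem]

-- ===== VERDICT (by name: the statement is the Claim_ definition above) =====
theorem check_if_simplified_digits_spec : Claim_equal_check_if_simplified_digits := by
  intro tokens _ _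
  unfold Spec_check_if_simplified_digits check_if_simplified_digits check_if_simplified_digits_alt
  have h := foldA_take_eq_altFindB tokens tokens.length (le_refl _)
  rwa [List.take_of_length_le (by simp)] at h
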